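-- pv_equiv track=rewrite | github.com/Beaty-Consultancy/scripts | aws-scripts/security/check_ebs_volumes_encryption.py | calculate_volume_statistics
-- ===== SOURCE A (Python) =====
-- def calculate_volume_statistics(volumes):
--     """Calculate volume encryption statistics"""
--     total_volumes = len(volumes)
--     encrypted_volumes = len([v for v in volumes if v.get('encrypted', False)])
--     unencrypted_volumes = total_volumes - encrypted_volumes
--     attached_volumes = len([v for v in volumes if v.get('isAttached', False)])
--     unattached_volumes = total_volumes - attached_volumes
--
--     return {
--         'total_volumes': total_volumes,
--         'encrypted_volumes': encrypted_volumes,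
--         'unencrypted_volumes': unencrypted_volumes,
--         'attached_volumes': attached_volumes,
--         'unattached_volumes': unattached_volumes
--     }
-- ===== SOURCE B (Python) =====
-- def calculate_volume_statistics(volumes):
--     """Calculate volume encryption statistics (divide-and-conquer merge of stat tuples)"""
--
--     def stats(lo, hi):
--         # stats of volumes[lo:hi] as a 5-tuple
--         # (total, encrypted, unencrypted, attached, unattached)
--         if hi - lo == 0:
--             return (0, 0, 0, 0, 0)
--         if hi - lo == 1:
--             v = volumes[lo]
--             e = 1 if v.get('encrypted', False) else 0
--             a = 1 if v.get('isAttached', False) else 0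
--             return (1, e, 1 - e, a, 1 - a)
--         mid = (lo + hi) // 2
--         left = stats(lo, mid)
--         right = stats(mid, hi)
--         return tuple(x + y for x, y in zip(left, right))
--
--     t, e, u, a, n = stats(0, len(volumes))
--     return {
--         'total_volumes': t,
--         'encrypted_volumes': e,
--         'unencrypted_volumes': u,
--         'attached_volumes': a,
--         'unattached_volumes': n
--     }
-- ===== Notes on version B (the rewrite author's own statement) =====
-- stated objective: alternative
-- what changed: Replaced A's whole-list filter-comprehension counts with a divide-and-conquer recursion that computes a full 5-tuple of statistics (counting unencrypted/unattached directly at the leaves instead of deriving them by subtraction) and merges the halves' tuples componentwise.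
import Mathlib
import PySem

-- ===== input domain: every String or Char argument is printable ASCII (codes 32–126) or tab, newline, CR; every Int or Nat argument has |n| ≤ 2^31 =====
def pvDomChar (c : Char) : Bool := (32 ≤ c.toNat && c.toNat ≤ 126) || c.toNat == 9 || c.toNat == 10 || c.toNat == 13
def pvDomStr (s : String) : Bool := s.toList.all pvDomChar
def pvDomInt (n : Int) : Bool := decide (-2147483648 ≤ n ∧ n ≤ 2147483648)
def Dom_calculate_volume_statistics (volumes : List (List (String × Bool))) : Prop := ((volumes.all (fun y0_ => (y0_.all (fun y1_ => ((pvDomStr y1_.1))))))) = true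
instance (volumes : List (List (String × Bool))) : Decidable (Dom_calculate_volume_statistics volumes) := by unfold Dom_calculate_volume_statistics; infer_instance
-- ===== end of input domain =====

-- B replaces A's whole-list filter-comprehension counts by a divide-and-conquer recursion over index
-- ranges that builds a 5-tuple of statistics at the leaves and merges halves componentwise; return value only.

-- ===== PORT A =====
-- v.get(key, False)
def pyGetB (v : List (String × Bool)) (k : String) : Bool :=
  (PySem.Dict.mk v).getD k false

def calculate_volume_statistics (volumes : List (List (String × Bool))) : List (String × Int) :=
  let total_volumes : Int := volumes.length
  let encrypted_volumes : Int := (volumes.filter (fun v => pyGetB v "encrypted")).length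
  let unencrypted_volumes : Int := total_volumes - encrypted_volumes
  let attached_volumes : Int := (volumes.filter (fun v => pyGetB v "isAttached")).length
  let unattached_volumes : Int := total_volumes - attached_volumes
  [("total_volumes", total_volumes),
   ("encrypted_volumes", encrypted_volumes),
   ("unencrypted_volumes", unencrypted_volumes),
   ("attached_volumes", attached_volumes),
   ("unattached_volumes", unattached_volumes)]

-- ===== PORT B =====
-- stats(lo, hi): the 5-tuple (total, encrypted, unencrypted, attached, unattached) of volumes[lo:hi]
def cvsStats (volumes : List (List (String × Bool))) (lo hi : Nat) : Int × Int × Int × Int × Int :=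
  if hi - lo = 0 then (0, 0, 0, 0, 0)
  else if hi - lo = 1 then
    let v := volumes.getD lo []      -- volumes[lo]; lo is in range on every call reached from 0, len
    let e : Int := if pyGetB v "encrypted" then 1 else 0
    let a : Int := if pyGetB v "isAttached" then 1 else 0
    (1, e, 1 - e, a, 1 - a)
  else
    let mid := (lo + hi) / 2
    let l := cvsStats volumes lo mid
    let r := cvsStats volumes mid hi
    (l.1 + r.1, l.2.1 + r.2.1, l.2.2.1 + r.2.2.1, l.2.2.2.1 + r.2.2.2.1, l.2.2.2.2 + r.2.2.2.2)
termination_by hi - lo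
decreasing_by all_goals omega

def calculate_volume_statistics_alt (volumes : List (List (String × Bool))) : List (String × Int) :=
  let s := cvsStats volumes 0 volumes.length
  [("total_volumes", s.1),
   ("encrypted_volumes", s.2.1),
   ("unencrypted_volumes", s.2.2.1),
   ("attached_volumes", s.2.2.2.1),
   ("unattached_volumes", s.2.2.2.2)]

-- ===== PRECONDITION & SPEC =====
def Spec_calculate_volume_statistics (volumes : List (List (String × Bool))) (out : List (String × Int)) : Prop := out = calculate_volume_statistics_alt volumes
instance (volumes : List (List (String × Bool))) (out : List (String × Int)) : Decidable (Spec_calculate_volume_statistics volumes out) := by unfold Spec_calculate_volume_statistics; infer_instance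

-- ===== CLAIM (what is proved, stated in full; the proofs are below) =====
def Claim_equal_calculate_volume_statistics : Prop := ∀ (volumes : List (List (String × Bool))), Dom_calculate_volume_statistics volumes → Spec_calculate_volume_statistics volumes (calculate_volume_statistics volumes)

-- ===== LEMMAS AND PROOFS =====
-- the statistics 5-tuple of a list, in A's terms
def cvsOf (l : List (List (String × Bool))) : Int × Int × Int × Int × Int :=
  ((l.length : Int),
   ((l.filter (fun v => pyGetB v "encrypted")).length : Int),
   (l.length : Int) - ((l.filter (fun v => pyGetB v "encrypted")).length : Int),
   ((l.filter (fun v => pyGetB v "isAttached")).length : Int),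
   (l.length : Int) - ((l.filter (fun v => pyGetB v "isAttached")).length : Int))

lemma cvsStats_eq (volumes : List (List (String × Bool))) :
    ∀ (n lo hi : Nat), hi - lo = n → hi ≤ volumes.length →
    cvsStats volumes lo hi = cvsOf ((volumes.drop lo).take (hi - lo)) := by
  intro n
  induction n using Nat.strong_induction_on with
  | _ n ih =>
    intro lo hi hn h2
    rw [cvsStats]
    split_ifs with h0 h1
    · simp [h0, cvsOf]
    · have hlt : lo < volumes.length := by omega
      have hv : volumes.getD lo [] = volumes[lo] := List.getD_eq_getElem _ _ hlt
      have hseg : (volumes.drop lo).take (hi - lo) = [volumes[lo]] := by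
        rw [h1, List.drop_eq_getElem_cons hlt]
        rfl
      rw [hseg]
      simp only [hv, cvsOf, List.filter_cons]
      by_cases he : pyGetB volumes[lo] "encrypted" <;>
        by_cases ha : pyGetB volumes[lo] "isAttached" <;>
          simp [he, ha]
    · have hmid1 : (lo + hi) / 2 - lo < n := by omega
      have hmid2 : hi - (lo + hi) / 2 < n := by omega
      simp only []
      rw [ih _ hmid1 lo ((lo + hi) / 2) rfl (by omega),
          ih _ hmid2 ((lo + hi) / 2) hi rfl h2]
      have hsplit : (volumes.drop lo).take (hi - lo)
          = (volumes.drop lo).take ((lo + hi) / 2 - lo)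
            ++ (volumes.drop ((lo + hi) / 2)).take (hi - (lo + hi) / 2) := by
        have h3 : hi - lo = ((lo + hi) / 2 - lo) + (hi - (lo + hi) / 2) := by omega
        have h4 : lo + ((lo + hi) / 2 - lo) = (lo + hi) / 2 := by omega
        rw [h3, List.take_add, List.drop_drop, h4]
      rw [hsplit]
      simp only [cvsOf, List.filter_append, List.length_append, Prod.mk.injEq]
      refine ⟨by push_cast; ring, by push_cast; ring, by push_cast; ring,
              by push_cast; ring, by push_cast; ring⟩

-- ===== VERDICT (by name: the statement is the Claim_ definition above) =====
theorem calculate_volume_statistics_spec : Claim_equal_calculate_volume_statistics := by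
  intro volumes _
  unfold Spec_calculate_volume_statistics calculate_volume_statistics calculate_volume_statistics_alt
  rw [cvsStats_eq volumes _ 0 volumes.length rfl le_rfl]
  simp [cvsOf]
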